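-- pv_equiv track=rewrite | github.com/matthewbelcher/ND-HFTT | 2025_spring/group6_project/data_aggregation/ultra_fast_orderbook.py | combine_metrics
-- ===== SOURCE A (Python) =====
-- def combine_metrics(metrics_list):
--     """
--     Optimized version that combines a list of metrics dictionaries into a single dictionary
--     using vectorized operations when possible
--
--     Args:
--         metrics_list: List of dictionaries with metrics
--
--     Returns:
--         Combined metrics dictionary
--     """
--     # Filter out None values
--     metrics_list = [m for m in metrics_list if m is not None]
--
--     if not metrics_list:
--         return {}
--
--     # Fast path for single item
--     if len(metrics_list) == 1:
--         return {k: [v] for k, v in metrics_list[0].items()}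
--
--     # Get all keys
--     all_keys = set()
--     for m in metrics_list:
--         all_keys.update(m.keys())
--
--     # Initialize dictionary with empty lists
--     combined = {key: [] for key in all_keys}
--
--     # Batch processing for better performance
--     batch_size = 10000
--     for i in range(0, len(metrics_list), batch_size):
--         batch = metrics_list[i:i+batch_size]
--
--         # Combine this batch
--         for metric in batch:
--             for key, value in metric.items():
--                 combined[key].append(value)
--
--     return combined
-- ===== SOURCE B (Python) =====
-- def combine_metrics(metrics_list):
--     """Combine a list of metrics dictionaries into a single dict of lists.
--
--     Divide and conquer: recursively combine each half of the list, then merge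
--     the two partial dict-of-lists results by concatenating per-key value lists.
--     No global accumulator pass, no key-collection pass, no batching.
--     """
--     ms = [m for m in metrics_list if m is not None]
--
--     def merge(left, right):
--         for k, vs in right.items():
--             if k in left:
--                 left[k] = left[k] + vs
--             else:
--                 left[k] = vs
--         return left
--
--     def go(lo, hi):
--         if hi - lo == 0:
--             return {}
--         if hi - lo == 1:
--             return {k: [v] for k, v in ms[lo].items()}
--         mid = (lo + hi) // 2
--         return merge(go(lo, mid), go(mid, hi))
--
--     return go(0, len(ms))
-- ===== Notes on version B (the rewrite author's own statement) =====
-- stated objective: alternative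
-- what changed: Replaced A's global dict-accumulator build (key-collection pass, empty-list pre-initialization, single-item fast path, batched append loop) by a divide-and-conquer recursion: combine each half of the list recursively and merge the two partial dict-of-lists by concatenating per-key value lists.
import Mathlib
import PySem

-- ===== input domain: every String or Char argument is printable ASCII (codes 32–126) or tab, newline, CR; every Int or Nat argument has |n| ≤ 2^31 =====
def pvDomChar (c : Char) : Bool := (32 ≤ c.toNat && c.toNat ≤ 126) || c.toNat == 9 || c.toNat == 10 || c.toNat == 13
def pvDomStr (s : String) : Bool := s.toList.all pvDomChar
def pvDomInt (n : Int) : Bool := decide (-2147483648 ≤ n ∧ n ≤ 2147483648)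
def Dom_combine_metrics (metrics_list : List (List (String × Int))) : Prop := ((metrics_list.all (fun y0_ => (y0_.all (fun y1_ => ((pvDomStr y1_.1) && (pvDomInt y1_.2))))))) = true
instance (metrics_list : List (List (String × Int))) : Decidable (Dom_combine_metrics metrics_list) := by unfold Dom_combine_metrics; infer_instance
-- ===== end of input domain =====

-- B replaces A's dict-accumulator build (key-collection, pre-initialization, fast path,
-- batched appends) by divide-and-conquer: combine each half recursively, then merge the
-- two partial dict-of-lists; an alternative decomposition of similar cost.


-- ===== PORT A =====
-- The element type has no None, so A's '[m for m in metrics_list if m is not None]'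
-- filter is the identity here and is not re-stated.
def combine_metrics (metrics_list : List (List (String × Int))) : List (String × List Int) :=
  if metrics_list = [] then []
  else if metrics_list.length = 1 then
    -- fast path: {k: [v] for k, v in metrics_list[0].items()}
    metrics_list.headI.map (fun p => (p.1, [p.2]))
  else
    -- all_keys = set(); for m in metrics_list: all_keys.update(m.keys())
    let allKeys : PySem.Set String :=
      metrics_list.foldl (fun s m => PySem.Set.update s (m.map Prod.fst)) PySem.Set.empty
    -- combined = {key: [] for key in all_keys}
    let combined : PySem.Dict String (List Int) :=
      allKeys.foldl (fun d k => d.insert k ([] : List Int)) PySem.Dict.empty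
    -- for i in range(0, len(metrics_list), 10000): batch = metrics_list[i:i+10000]; …
    ((PySem.List.pyRange 0 metrics_list.length 10000).foldl (fun d i =>
        (PySem.List.slice metrics_list (some i) (some (i + 10000))).foldl
          (fun d metric =>
            metric.foldl (fun d p => d.modify p.1 [] (fun l => l ++ [p.2])) d) d)
      combined).items

-- ===== PORT B =====
-- merge(left, right): for k, vs in right.items(): left[k] = left[k] + vs if k in left else vs
def mergeCombined (left right : PySem.Dict String (List Int)) : PySem.Dict String (List Int) :=
  right.items.foldl (fun d p =>
    if d.contains p.1 then d.insert p.1 (d.getD p.1 [] ++ p.2) else d.insert p.1 p.2) left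

-- go(lo, hi); ms[lo] is in range whenever lo < hi ≤ len(ms), so the index is total here
def goCombine (ms : List (List (String × Int))) (lo hi : Nat) : PySem.Dict String (List Int) :=
  if hi - lo = 0 then PySem.Dict.empty
  else if hi - lo = 1 then
    -- {k: [v] for k, v in ms[lo].items()}
    (ms.getD lo []).foldl (fun d p => d.insert p.1 [p.2]) PySem.Dict.empty
  else
    mergeCombined (goCombine ms lo ((lo + hi) / 2)) (goCombine ms ((lo + hi) / 2) hi)
termination_by hi - lo
decreasing_by all_goals omega

def combine_metrics_alt (metrics_list : List (List (String × Int))) : List (String × List Int) :=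
  (goCombine metrics_list 0 metrics_list.length).items

-- ===== PRECONDITION & SPEC =====
-- Pre_ excludes inner association lists with duplicate keys: such inputs cannot arise from
-- Python dicts (a dict's keys are unique), and on them A's single-dict fast path would keep
-- only the last value per key while the general path keeps all occurrences.
def Pre_combine_metrics (metrics_list : List (List (String × Int))) : Prop :=
  ∀ m ∈ metrics_list, (m.map Prod.fst).Nodup
instance (metrics_list : List (List (String × Int))) : Decidable (Pre_combine_metrics metrics_list) := by unfold Pre_combine_metrics; infer_instance
def pvWitness_combine_metrics : (List (List (String × Int))) :=
  [[("a", 1)], [("a", 2), ("b", 3)]]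

def Spec_combine_metrics (metrics_list : List (List (String × Int))) (out : List (String × List Int)) : Prop := out = combine_metrics_alt metrics_list
instance (metrics_list : List (List (String × Int))) (out : List (String × List Int)) : Decidable (Spec_combine_metrics metrics_list out) := by unfold Spec_combine_metrics; infer_instance

-- ===== CLAIM (what is proved, stated in full; the proofs are below) =====
def Claim_equal_combine_metrics : Prop := ∀ (metrics_list : List (List (String × Int))), Dom_combine_metrics metrics_list → Pre_combine_metrics metrics_list → Spec_combine_metrics metrics_list (combine_metrics metrics_list)

-- ===== LEMMAS AND PROOFS =====

-- the reference dict both sides are reduced to: one modify-append fold over the flat pair stream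
def dfold (l : List (List (String × Int))) : PySem.Dict String (List Int) :=
  l.flatten.foldl (fun d p => d.modify p.1 [] (fun t => t ++ [p.2])) PySem.Dict.empty

lemma dfold_keys (l : List (List (String × Int))) :
    (dfold l).keys = PySem.Set.ofList (l.flatten.map Prod.fst) := by
  rw [dfold, PySem.Dict.keys_foldl_modify_key l.flatten Prod.fst ([] : List Int)
    (fun _ p => fun t => t ++ [p.2]) PySem.Dict.empty, PySem.Dict.keys_empty,
    PySem.Set.update_nil_left]

lemma dfold_getD (l : List (List (String × Int))) (c : String) :
    (dfold l).getD c [] = (l.flatten.filter (fun p => p.1 == c)).map Prod.snd := by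
  rw [dfold, PySem.Dict.getD_foldl_modify_append, PySem.Dict.getD_empty, List.nil_append]

-- with unique keys, the filter at a present key picks exactly that pair
lemma filter_key_nodup (m : List (String × Int)) (hnd : (m.map Prod.fst).Nodup) :
    ∀ p ∈ m, m.filter (fun q => q.1 == p.1) = [p] := by
  induction m with
  | nil => intro p hp; cases hp
  | cons q rest ih =>
      intro p hp
      rw [List.map_cons, List.nodup_cons] at hnd
      rcases List.mem_cons.mp hp with rfl | hpr
      · rw [List.filter_cons_of_pos (by simp)]
        have : rest.filter (fun r => r.1 == p.1) = [] := by
          refine List.filter_eq_nil_iff.mpr fun r hr => ?_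
          simp only [beq_iff_eq]
          intro hq
          exact hnd.1 (hq ▸ List.mem_map_of_mem hr)
        rw [this]
      · have hne : q.1 ≠ p.1 := fun hq => hnd.1 (hq ▸ List.mem_map_of_mem hpr)
        rw [List.filter_cons_of_neg (by simpa using hne)]
        exact ih hnd.2 p hpr

-- one dict, unique keys: the modify-append fold yields exactly {k: [v] for k, v in m.items()}
lemma single_dict (m : List (String × Int)) (hnd : (m.map Prod.fst).Nodup) :
    (dfold [m]).items = m.map (fun p => (p.1, [p.2])) := by
  have hflat : ([m] : List (List (String × Int))).flatten = m := by
    simp [List.flatten_cons]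
  have hkeys : (dfold [m]).keys = m.map Prod.fst := by
    rw [dfold_keys, hflat, PySem.Set.ofList_eq_self_of_nodup _ hnd]
  have hnodup : (dfold [m]).keys.Nodup := hkeys ▸ hnd
  rw [PySem.Dict.items_eq_map_keys _ hnodup ([] : List Int), hkeys, List.map_map]
  refine List.map_congr_left fun p hp => ?_
  have hget : (dfold [m]).getD p.1 [] = [p.2] := by
    rw [dfold_getD, hflat, filter_key_nodup m hnd p hp]
    rfl
  simp [Function.comp, hget]

-- B's base case builds the same dict as the modify-append fold over that one dict
lemma insert_fold_single (m : List (String × Int)) (hnd : (m.map Prod.fst).Nodup) :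
    m.foldl (fun d p => d.insert p.1 [p.2]) PySem.Dict.empty = dfold [m] := by
  apply PySem.Dict.ext
  rw [single_dict m hnd,
    PySem.Dict.items_foldl_insert_fresh m (fun p => p.1) (fun p => [p.2]) PySem.Dict.empty
      (fun a _ => PySem.Dict.contains_empty _) hnd]
  rfl

-- filtering the items of a nodup-keyed map picks the one entry at c (or nothing)
lemma filter_map_keys (K : List String) (g : String → List Int) (c : String)
    (hnd : K.Nodup) [DecidableEq String] :
    (K.map (fun k => (k, g k))).filter (fun p => p.1 == c)
      = if c ∈ K then [(c, g c)] else [] := by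
  induction K with
  | nil => simp
  | cons k rest ih =>
      rw [List.nodup_cons] at hnd
      by_cases hk : k = c
      · subst hk
        rw [List.map_cons, List.filter_cons_of_pos (by simp), ih hnd.2, if_neg hnd.1,
          if_pos (List.mem_cons_self)]
      · rw [List.map_cons, List.filter_cons_of_neg (by simpa using hk), ih hnd.2]
        by_cases hc : c ∈ rest
        · rw [if_pos hc, if_pos (by simp [hc])]
        · rw [if_neg hc, if_neg (by simp [hc, Ne.symm hk])]

-- Set.update ignores duplicates in its second argument
lemma update_ofList_right (s : PySem.Set String) (xs : List String) :
    PySem.Set.update s (PySem.Set.ofList xs) = PySem.Set.update s xs := by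
  rw [PySem.Set.update_eq_append_filter, PySem.Set.update_eq_append_filter,
    PySem.Set.ofList_ofList]

-- the merge loop: keys extend in first-occurrence order, value lists concatenate per key
lemma merge_fold (ps : List (String × List Int)) :
    ∀ (a : PySem.Dict String (List Int)),
      ((ps.foldl (fun d p =>
          if d.contains p.1 then d.insert p.1 (d.getD p.1 [] ++ p.2) else d.insert p.1 p.2) a).keys
          = PySem.Set.update a.keys (ps.map Prod.fst))
      ∧ (∀ c, (ps.foldl (fun d p =>
          if d.contains p.1 then d.insert p.1 (d.getD p.1 [] ++ p.2) else d.insert p.1 p.2) a).getD c []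
          = a.getD c [] ++ ((ps.filter (fun p => p.1 == c)).map Prod.snd).flatten) := by
  induction ps with
  | nil => intro a; exact ⟨by simp [PySem.Set.update], fun c => by simp⟩
  | cons p rest ih =>
      intro a
      rw [List.foldl_cons]
      set a' : PySem.Dict String (List Int) :=
        if a.contains p.1 then a.insert p.1 (a.getD p.1 [] ++ p.2) else a.insert p.1 p.2 with ha'
      obtain ⟨ihk, ihg⟩ := ih a'
      constructor
      · rw [ihk, List.map_cons, PySem.Set.update_cons]
        congr 1
        by_cases hc : a.contains p.1
        · rw [ha', if_pos hc, PySem.Dict.keys_insert_of_contains _ _ hc,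
            PySem.Set.add_of_mem ((PySem.Dict.contains_iff_mem_keys _ _).mp hc)]
        · rw [ha', if_neg hc, PySem.Dict.keys_insert_of_not_contains _ _
              (Bool.eq_false_iff.mpr hc),
            PySem.Set.add_of_not_mem (fun hm => hc ((PySem.Dict.contains_iff_mem_keys _ _).mpr hm))]
      · intro c
        rw [ihg c]
        by_cases hpc : p.1 = c
        · rw [List.filter_cons_of_pos (by simpa using hpc)]
          have hget : a'.getD c [] = a.getD c [] ++ p.2 := by
            by_cases hc : a.contains p.1
            · rw [ha', if_pos hc, ← hpc, PySem.Dict.getD_insert_self]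
            · rw [ha', if_neg hc, ← hpc, PySem.Dict.getD_insert_self,
                PySem.Dict.getD_of_not_contains _ _ (Bool.eq_false_iff.mpr hc),
                List.nil_append]
          rw [hget, List.map_cons, List.flatten_cons, List.append_assoc]
        · rw [List.filter_cons_of_neg (by simpa using hpc)]
          have hget : a'.getD c [] = a.getD c [] := by
            by_cases hc : a.contains p.1
            · rw [ha', if_pos hc, PySem.Dict.getD_insert_of_ne _ _ _ (fun h => hpc h.symm)]
            · rw [ha', if_neg hc, PySem.Dict.getD_insert_of_ne _ _ _ (fun h => hpc h.symm)]
          rw [hget]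

-- merging the two halves' dicts is folding over the concatenated halves
lemma merge_dfold (l1 l2 : List (List (String × Int))) :
    mergeCombined (dfold l1) (dfold l2) = dfold (l1 ++ l2) := by
  obtain ⟨hk, hg⟩ := merge_fold (dfold l2).items (dfold l1)
  have hnd2 : (dfold l2).keys.Nodup := (dfold_keys l2) ▸ PySem.Set.nodup_ofList _
  have hitems2 : (dfold l2).items
      = (dfold l2).keys.map (fun k => (k, (dfold l2).getD k [])) :=
    PySem.Dict.items_eq_map_keys _ hnd2 ([] : List Int)
  have hkeys2 : (dfold l2).items.map Prod.fst = (dfold l2).keys := by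
    have hcomp : (Prod.fst ∘ fun k : String => (k, (dfold l2).getD k ([] : List Int))) = id :=
      rfl
    rw [hitems2, List.map_map, hcomp, List.map_id]
  -- keys of the merge
  have hkeysm : (mergeCombined (dfold l1) (dfold l2)).keys
      = PySem.Set.ofList ((l1 ++ l2).flatten.map Prod.fst) := by
    rw [mergeCombined, hk, hkeys2, dfold_keys, dfold_keys, update_ofList_right,
      List.flatten_append, List.map_append, PySem.Set.ofList_append]
  have hndm : (mergeCombined (dfold l1) (dfold l2)).keys.Nodup :=
    hkeysm ▸ PySem.Set.nodup_ofList _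
  -- getD of the merge
  have hgm : ∀ c, (mergeCombined (dfold l1) (dfold l2)).getD c []
      = (dfold (l1 ++ l2)).getD c [] := by
    intro c
    have htail : (((((dfold l2).keys.map (fun k => (k, (dfold l2).getD k []))).filter
          (fun p => p.1 == c)).map Prod.snd)).flatten = (dfold l2).getD c [] := by
      rw [filter_map_keys _ _ c hnd2]
      by_cases hc : c ∈ (dfold l2).keys
      · rw [if_pos hc]
        simp
      · rw [if_neg hc, PySem.Dict.getD_of_not_contains _ _
          (Bool.eq_false_iff.mpr (fun h => hc ((PySem.Dict.contains_iff_mem_keys _ _).mp h)))]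
        rfl
    rw [mergeCombined, hg c, hitems2, htail, dfold_getD l1 c, dfold_getD l2 c,
      dfold_getD (l1 ++ l2) c, List.flatten_append, List.filter_append, List.map_append]
  apply PySem.Dict.ext
  rw [PySem.Dict.items_eq_map_keys _ hndm ([] : List Int),
    PySem.Dict.items_eq_map_keys (dfold (l1 ++ l2))
      ((dfold_keys (l1 ++ l2)) ▸ PySem.Set.nodup_ofList _) ([] : List Int),
    hkeysm, dfold_keys]
  exact List.map_congr_left fun k _ => by rw [hgm k]

-- the recursion computes the fold over the corresponding slice
lemma go_eq (ms : List (List (String × Int))) (hnd : ∀ m ∈ ms, (m.map Prod.fst).Nodup) :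
    ∀ (n lo hi : Nat), hi - lo ≤ n → hi ≤ ms.length →
      goCombine ms lo hi = dfold ((ms.drop lo).take (hi - lo)) := by
  intro n
  induction n with
  | zero =>
      intro lo hi hn hlen
      rw [goCombine, if_pos (by omega)]
      rw [Nat.sub_eq_zero_of_le (by omega), List.take_zero]
      rfl
  | succ n ih =>
      intro lo hi hn hlen
      rw [goCombine]
      split_ifs with h0 h1
      · rw [h0, List.take_zero]; rfl
      · -- base case: one dict
        have hlo : lo < ms.length := by omega
        have hdrop : ms.drop lo = ms[lo] :: ms.drop (lo + 1) :=
          List.drop_eq_getElem_cons hlo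
        have hgetD : ms.getD lo [] = ms[lo] := by
          rw [List.getD_eq_getElem?_getD, List.getElem?_eq_getElem hlo]; rfl
        rw [h1, hdrop, List.take_succ_cons, List.take_zero, hgetD]
        exact insert_fold_single _ (hnd _ (List.getElem_mem hlo))
      · -- recursive case
        have h2 : 2 ≤ hi - lo := by omega
        set mid := (lo + hi) / 2 with hmid
        have hb : lo < mid ∧ mid < hi := by constructor <;> omega
        rw [ih lo mid (by omega) (by omega), ih mid hi (by omega) hlen, merge_dfold]
        congr 1
        have hdd : ms.drop mid = (ms.drop lo).drop (mid - lo) := by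
          rw [List.drop_drop]; congr 1; omega
        rw [hdd, ← List.take_add]
        congr 1
        omega

-- ===== A-side machinery (unchanged from the literal port of A's general branch) =====

-- range(a, b, 10000) peels its first index when a < b
lemma pyRange_batch_cons (a b : Int) (h : a < b) :
    PySem.List.pyRange a b 10000 = a :: PySem.List.pyRange (a + 10000) b 10000 := by
  rw [PySem.List.pyRange_of_pos _ _ (by norm_num), PySem.List.pyRange_of_pos _ _ (by norm_num)]
  have hcount : (if a < b then ((b - a + 10000 - 1) / 10000).toNat else 0)
      = (if a + 10000 < b then ((b - (a + 10000) + 10000 - 1) / 10000).toNat else 0) + 1 := by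
    split_ifs <;> omega
  rw [hcount, List.range_succ_eq_map, List.map_cons, List.map_map]
  refine congrArg₂ _ (by ring) (List.map_congr_left fun k _ => ?_)
  simp only [Function.comp]
  push_cast
  ring

-- the batched fill loop is the plain fold over the whole list
lemma foldl_batches {α β : Type} (f : β → α → β) :
    ∀ (fuel : Nat) (xs : List α) (a : Int) (acc : β), 0 ≤ a → xs.length - a.toNat ≤ fuel →
      (PySem.List.pyRange a xs.length 10000).foldl
          (fun acc i => (PySem.List.slice xs (some i) (some (i + 10000))).foldl f acc) acc
        = (xs.drop a.toNat).foldl f acc := by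
  intro fuel
  induction fuel with
  | zero =>
      intro xs a acc ha hfuel
      have hge : (xs.length : Int) ≤ a := by omega
      rw [PySem.List.pyRange_of_pos _ _ (by norm_num : (0:Int) < 10000)]
      rw [if_neg (by omega), List.range_zero, List.map_nil, List.foldl_nil,
        List.drop_eq_nil_of_le (by omega), List.foldl_nil]
  | succ n ih =>
      intro xs a acc ha hfuel
      by_cases hlt : a < (xs.length : Int)
      · obtain ⟨an, rfl⟩ : ∃ m : Nat, a = (m : Int) := ⟨a.toNat, by omega⟩
        rw [pyRange_batch_cons _ _ hlt, List.foldl_cons]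
        have hsl : PySem.List.slice xs (some (an : Int)) (some ((an : Int) + 10000))
            = List.take 10000 (List.drop ((an : Int)).toNat xs) := by
          have h2 : ((an : Int) + 10000) = (((an + 10000 : Nat)) : Int) := by push_cast; ring
          rw [h2, PySem.List.slice_natCast]
          congr 1
          omega
        rw [hsl]
        have hdrop : (xs.drop ((an : Int)).toNat).foldl f acc
            = (List.drop ((an : Int) + 10000).toNat xs).foldl f
                ((List.take 10000 (List.drop ((an : Int)).toNat xs)).foldl f acc) := by
          conv_lhs => rw [← List.take_append_drop 10000 (xs.drop ((an : Int)).toNat)]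
          rw [List.foldl_append, List.drop_drop]
          congr 2
        rw [hdrop, ← ih xs ((an : Int) + 10000) _ (by omega) (by omega)]
      · rw [PySem.List.pyRange_of_pos _ _ (by norm_num : (0:Int) < 10000)]
        rw [if_neg (by omega), List.range_zero, List.map_nil, List.foldl_nil,
          List.drop_eq_nil_of_le (by omega), List.foldl_nil]

-- the key-collection loop is one Set.update over the flattened key stream
lemma foldl_update_flatten (L : List (List (String × Int))) : ∀ (s : PySem.Set String),
    L.foldl (fun s m => PySem.Set.update s (m.map Prod.fst)) s
      = PySem.Set.update s (L.flatten.map Prod.fst) := by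
  induction L with
  | nil => intro s; simp [PySem.Set.update]
  | cons m rest ih =>
      intro s
      rw [List.foldl_cons, ih, List.flatten_cons, List.map_append, PySem.Set.update_append]

-- the pre-initialization loop puts [] everywhere (also at absent keys, via the default)
lemma getD_preinit (ks : List String) : ∀ (d : PySem.Dict String (List Int)),
    (∀ c, d.getD c ([] : List Int) = []) →
      ∀ c, (ks.foldl (fun d k => d.insert k ([] : List Int)) d).getD c [] = [] := by
  induction ks with
  | nil => intro d hd c; simpa using hd c
  | cons k rest ih =>
      intro d hd c
      rw [List.foldl_cons]
      refine ih _ (fun c' => ?_) c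
      rw [PySem.Dict.getD_insert]
      split_ifs
      · rfl
      · exact hd c'

-- A's general branch builds exactly the dict dfold builds
lemma general_branch (ml : List (List (String × Int))) :
    (let allKeys : PySem.Set String :=
        ml.foldl (fun s m => PySem.Set.update s (m.map Prod.fst)) PySem.Set.empty
     let combined : PySem.Dict String (List Int) :=
        allKeys.foldl (fun d k => d.insert k ([] : List Int)) PySem.Dict.empty
     ((PySem.List.pyRange 0 ml.length 10000).foldl (fun d i =>
         (PySem.List.slice ml (some i) (some (i + 10000))).foldl
           (fun d metric =>
             metric.foldl (fun d p => d.modify p.1 [] (fun l => l ++ [p.2])) d) d)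
       combined).items)
      = (dfold ml).items := by
  simp only []
  set K : List String := ml.flatten.map Prod.fst with hK
  set step : PySem.Dict String (List Int) → (String × Int) → PySem.Dict String (List Int) :=
    fun d p => d.modify p.1 [] (fun l => l ++ [p.2]) with hstep
  set allKeys : PySem.Set String :=
    ml.foldl (fun s m => PySem.Set.update s (m.map Prod.fst)) PySem.Set.empty with hAK
  set combined : PySem.Dict String (List Int) :=
    allKeys.foldl (fun d k => d.insert k ([] : List Int)) PySem.Dict.empty with hC
  have hAKeq : allKeys = PySem.Set.ofList K := by
    rw [hAK, foldl_update_flatten]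
    rfl
  -- the batched loop equals the flat fold
  have hbatch : (PySem.List.pyRange 0 ml.length 10000).foldl (fun d i =>
        (PySem.List.slice ml (some i) (some (i + 10000))).foldl
          (fun d metric => metric.foldl step d) d) combined
      = ml.flatten.foldl step combined := by
    rw [List.foldl_flatten]
    exact foldl_batches _ ml.length ml 0 combined (le_refl 0) (by simp)
  set DA := ml.flatten.foldl step combined with hDA
  -- keys of combined: set(K), values all []
  have hCkeys : combined.keys = PySem.Set.ofList K := by
    rw [hC, PySem.Dict.keys_foldl_insert allKeys (fun _ _ => ([] : List Int)) PySem.Dict.empty,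
      hAKeq, PySem.Dict.keys_empty, PySem.Set.update_nil_left, PySem.Set.ofList_ofList]
  have hCzero : ∀ c, combined.getD c ([] : List Int) = [] := by
    intro c
    exact getD_preinit allKeys PySem.Dict.empty (fun c => PySem.Dict.getD_empty _ _) c
  -- keys of DA: still set(K)
  have hDAkeys : DA.keys = PySem.Set.ofList K := by
    rw [hDA, hstep, PySem.Dict.keys_foldl_modify_key ml.flatten Prod.fst ([] : List Int)
      (fun _ p => fun l => l ++ [p.2]) combined, hCkeys, ← hK,
      PySem.Set.update_eq_append_filter]
    have : List.filter (fun y => !(PySem.Set.ofList K).contains y) (PySem.Set.ofList K) = [] :=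
      List.filter_eq_nil_iff.mpr fun y hy => by
        simp only [PySem.Set.mem_ofList] at hy
        simp [hy]
    rw [this, List.append_nil]
  -- per-key values agree with dfold
  have hgetD : ∀ c, DA.getD c ([] : List Int) = (dfold ml).getD c [] := by
    intro c
    rw [hDA, hstep, PySem.Dict.getD_foldl_modify_append, hCzero, List.nil_append,
      dfold_getD]
  have hnA : DA.keys.Nodup := hDAkeys ▸ PySem.Set.nodup_ofList K
  have hnB : (dfold ml).keys.Nodup := (dfold_keys ml) ▸ PySem.Set.nodup_ofList K
  rw [hbatch, PySem.Dict.items_eq_map_keys DA hnA ([] : List Int),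
    PySem.Dict.items_eq_map_keys (dfold ml) hnB ([] : List Int), hDAkeys, dfold_keys, ← hK]
  exact List.map_congr_left fun k _ => by rw [hgetD k]

-- B is the flat fold on every input with unique inner keys
lemma alt_eq_dfold (ml : List (List (String × Int)))
    (hnd : ∀ m ∈ ml, (m.map Prod.fst).Nodup) :
    combine_metrics_alt ml = (dfold ml).items := by
  rw [combine_metrics_alt, go_eq ml hnd ml.length 0 ml.length (by omega) (le_refl _)]
  simp

-- ===== VERDICT (by name: the statement is the Claim_ definition above) =====
theorem combine_metrics_spec : Claim_equal_combine_metrics := by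
  intro ml _hdom hpre
  show combine_metrics ml = combine_metrics_alt ml
  rw [alt_eq_dfold ml hpre, combine_metrics]
  split_ifs with hnil hone
  · subst hnil; rfl
  · -- single-dict fast path
    obtain ⟨m, rfl⟩ : ∃ m, ml = [m] := by
      cases ml with
      | nil => exact absurd rfl hnil
      | cons m t =>
        cases t with
        | nil => exact ⟨m, rfl⟩
        | cons _ _ => simp at hone
    rw [single_dict m (hpre m (by simp))]
    simp [List.headI]
  · exact general_branch ml
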